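-- pv_equiv track=rewrite | github.com/Leandecks/python | 3/data_structures_review/liste_tuple.py | ordina
-- ===== SOURCE A (Python) =====
-- def ordina(l1, l2):
--     l1 = sorted(l1)
--     l2 = sorted(l2)
--
--     finale = set()
--
--     for k in range(5):
--         tup = (l1[k], l2[k])
--         finale.add(tup)
--
--     return finale
-- ===== SOURCE B (Python) =====
-- def _five_smallest(l):
--     # bounded selection: keep a sorted buffer of at most the 5 smallest seen so far
--     best = []
--     for x in l:
--         i = 0
--         while i < len(best) and best[i] <= x:
--             i += 1
--         best.insert(i, x)
--         if len(best) > 5: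
--             best.pop()
--     return best
--
--
-- def ordina(l1, l2):
--     a = _five_smallest(l1)
--     b = _five_smallest(l2)
--     finale = set()
--     for k in range(5):
--         finale.add((a[k], b[k]))
--     return finale
-- ===== Notes on version B (the rewrite author's own statement) =====
-- stated objective: alternative
-- what changed: Instead of fully sorting both lists, B selects the five smallest of each list in one pass with a bounded (length<=5) insertion buffer, then pairs them as A does.
import Mathlib
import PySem

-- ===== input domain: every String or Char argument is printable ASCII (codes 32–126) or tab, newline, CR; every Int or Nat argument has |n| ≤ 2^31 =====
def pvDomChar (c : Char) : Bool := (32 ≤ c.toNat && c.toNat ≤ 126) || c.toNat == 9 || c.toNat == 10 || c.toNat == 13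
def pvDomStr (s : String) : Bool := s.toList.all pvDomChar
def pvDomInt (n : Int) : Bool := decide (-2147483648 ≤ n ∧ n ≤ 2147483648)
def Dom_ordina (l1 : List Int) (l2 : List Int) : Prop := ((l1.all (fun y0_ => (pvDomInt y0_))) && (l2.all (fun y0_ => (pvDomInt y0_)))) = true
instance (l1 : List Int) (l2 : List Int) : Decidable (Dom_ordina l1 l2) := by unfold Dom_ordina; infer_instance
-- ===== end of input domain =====

-- B selects the five smallest of each list with a bounded insertion buffer instead of fully sorting; alternative algorithm, same pairing.


-- ===== PORT A =====
def ordina (l1 : List Int) (l2 : List Int) : List (Int × Int) :=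
  let s1 := PySem.List.sorted l1 (fun x => x) false
  let s2 := PySem.List.sorted l2 (fun x => x) false
  (PySem.List.pyRange 0 5 1).foldl
    (fun finale k =>
      PySem.Set.add finale (PySem.List.pyGetD s1 k 0, PySem.List.pyGetD s2 k 0))
    PySem.Set.empty

-- ===== PORT B =====
-- scan-from-front insertion of x into the sorted buffer (the 'while i < len(best) and best[i] <= x' loop + insert)
def fsInsert : List Int → Int → List Int
  | [], x => [x]
  | y :: ys, x => if y ≤ x then y :: fsInsert ys x else x :: y :: ys

def fiveSmallest (l : List Int) : List Int :=
  l.foldl (fun best x =>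
    let b := fsInsert best x
    if 5 < b.length then b.dropLast else b) []

def ordina_alt (l1 : List Int) (l2 : List Int) : List (Int × Int) :=
  let a := fiveSmallest l1
  let b := fiveSmallest l2
  (PySem.List.pyRange 0 5 1).foldl
    (fun finale k =>
      PySem.Set.add finale (PySem.List.pyGetD a k 0, PySem.List.pyGetD b k 0))
    PySem.Set.empty

-- ===== PRECONDITION & SPEC =====
-- A raises IndexError (l1[k] / l2[k] for k < 5) when either list has fewer than 5 elements.
def Pre_ordina (l1 : List Int) (l2 : List Int) : Prop := 5 ≤ l1.length ∧ 5 ≤ l2.length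
instance (l1 : List Int) (l2 : List Int) : Decidable (Pre_ordina l1 l2) := by unfold Pre_ordina; infer_instance

def pvWitness_ordina : List Int × List Int := ([3, 1, 4, 1, 5, 9], [2, 6, 5, 3, 5])

def Spec_ordina (l1 : List Int) (l2 : List Int) (out : List (Int × Int)) : Prop := out = ordina_alt l1 l2
instance (l1 : List Int) (l2 : List Int) (out : List (Int × Int)) : Decidable (Spec_ordina l1 l2 out) := by unfold Spec_ordina; infer_instance

-- ===== CLAIM (what is proved, stated in full; the proofs are below) =====
def Claim_equal_ordina : Prop := ∀ (l1 : List Int) (l2 : List Int), Dom_ordina l1 l2 → Pre_ordina l1 l2 → Spec_ordina l1 l2 (ordina l1 l2)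

-- ===== LEMMAS AND PROOFS =====

theorem fsInsert_perm (s : List Int) (x : Int) : (fsInsert s x).Perm (x :: s) := by
  induction s with
  | nil => simp [fsInsert]
  | cons y ys ih =>
    simp only [fsInsert]
    split
    · exact ((ih.cons y).trans (List.Perm.swap x y ys))
    · exact List.Perm.refl _

theorem fsInsert_mem {s : List Int} {x z : Int} (h : z ∈ fsInsert s x) : z = x ∨ z ∈ s := by
  have := (fsInsert_perm s x).mem_iff.mp h
  simpa using this

theorem fsInsert_pairwise {s : List Int} (x : Int) (h : s.Pairwise (· ≤ ·)) :
    (fsInsert s x).Pairwise (· ≤ ·) := by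
  induction s with
  | nil => simp [fsInsert]
  | cons y ys ih =>
    rcases List.pairwise_cons.mp h with ⟨hy, hys⟩
    simp only [fsInsert]
    split
    · rename_i hyx
      refine List.pairwise_cons.mpr ⟨?_, ih hys⟩
      intro z hz
      rcases fsInsert_mem hz with rfl | hz'
      · exact hyx
      · exact hy z hz'
    · rename_i hyx
      have hxy : x ≤ y := le_of_lt (lt_of_not_ge hyx)
      refine List.pairwise_cons.mpr ⟨?_, h⟩
      intro z hz
      rcases List.mem_cons.mp hz with rfl | hz'
      · exact hxy
      · exact le_trans hxy (hy z hz')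

theorem fsInsert_length (s : List Int) (x : Int) : (fsInsert s x).length = s.length + 1 := by
  induction s with
  | nil => simp [fsInsert]
  | cons y ys ih => simp only [fsInsert]; split <;> simp [ih]

theorem take_fsInsert (n : ℕ) (s : List Int) (x : Int) :
    (fsInsert (s.take n) x).take n = (fsInsert s x).take n := by
  induction s generalizing n with
  | nil => simp
  | cons y ys ih =>
    cases n with
    | zero => simp
    | succ m =>
      simp only [List.take_succ_cons, fsInsert]
      split
      · simp [List.take_succ_cons, ih m]
      · cases m with
        | zero => simp
        | succ p =>
          simp [List.take_succ_cons, List.take_take]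

-- the B fold step, on a buffer of length ≤ 5, is insertion followed by take 5
theorem stepB_eq (best : List Int) (x : Int) (h : best.length ≤ 5) :
    (let b := fsInsert best x; if 5 < b.length then b.dropLast else b) = (fsInsert best x).take 5 := by
  have hl := fsInsert_length best x
  by_cases h6 : 5 < (fsInsert best x).length
  · have : (fsInsert best x).length = 6 := by omega
    rw [if_pos h6, List.dropLast_eq_take, this]
  · have h5 : (fsInsert best x).length ≤ 5 := by omega
    simp [h6, List.take_of_length_le h5]

theorem foldl_stepB (l : List Int) (s : List Int) :
    l.foldl (fun best x => let b := fsInsert best x; if 5 < b.length then b.dropLast else b) (s.take 5)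
      = (l.foldl fsInsert s).take 5 := by
  induction l generalizing s with
  | nil => simp
  | cons x xs ih =>
    simp only [List.foldl_cons]
    rw [stepB_eq _ x (by simpa using List.length_take_le 5 s), take_fsInsert, ih]

theorem foldl_fsInsert_perm (l : List Int) (s : List Int) :
    (l.foldl fsInsert s).Perm (l ++ s) := by
  induction l generalizing s with
  | nil => simp
  | cons x xs ih =>
    simp only [List.foldl_cons]
    exact (ih (fsInsert s x)).trans (((fsInsert_perm s x).append_left xs).trans List.perm_middle)

theorem foldl_fsInsert_pairwise (l : List Int) (s : List Int) (h : s.Pairwise (· ≤ ·)) :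
    (l.foldl fsInsert s).Pairwise (· ≤ ·) := by
  induction l generalizing s with
  | nil => exact h
  | cons x xs ih => exact ih _ (fsInsert_pairwise x h)

theorem fiveSmallest_eq (l : List Int) :
    fiveSmallest l = (PySem.List.sorted l (fun x => x) false).take 5 := by
  have h1 : l.foldl fsInsert [] = PySem.List.sorted l (fun x => x) false := by
    have hp : (l.foldl fsInsert []).Perm l := by simpa using foldl_fsInsert_perm l []
    have hq := foldl_fsInsert_pairwise l [] (by simp)
    exact (PySem.List.sorted_id_eq_of_perm_of_pairwise _ _ hp hq).symm
  have h2 := foldl_stepB l []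
  simpa [fiveSmallest, h1] using h2

theorem pyGetD_take5 (s : List Int) (n : ℕ) (d : Int) (h : n < 5) :
    PySem.List.pyGetD (s.take 5) (n : Int) d = PySem.List.pyGetD s (n : Int) d := by
  simp only [PySem.List.pyGetD_natCast, List.getD, List.getElem?_take, h, if_pos]

-- ===== VERDICT (by name: the statement is the Claim_ definition above) =====
theorem ordina_spec : Claim_equal_ordina := by
  intro l1 l2 _ _
  unfold Spec_ordina ordina ordina_alt
  rw [fiveSmallest_eq l1, fiveSmallest_eq l2]
  have hr : PySem.List.pyRange 0 5 1 = [0, 1, 2, 3, 4] := by decide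
  rw [hr]
  simp only [List.foldl_cons, List.foldl_nil]
  rw [show ((0 : Int) = ((0 : ℕ) : Int)) from rfl, show ((1 : Int) = ((1 : ℕ) : Int)) from rfl,
      show ((2 : Int) = ((2 : ℕ) : Int)) from rfl, show ((3 : Int) = ((3 : ℕ) : Int)) from rfl,
      show ((4 : Int) = ((4 : ℕ) : Int)) from rfl]
  rw [pyGetD_take5 _ 0 _ (by norm_num), pyGetD_take5 _ 0 _ (by norm_num),
      pyGetD_take5 _ 1 _ (by norm_num), pyGetD_take5 _ 1 _ (by norm_num),
      pyGetD_take5 _ 2 _ (by norm_num), pyGetD_take5 _ 2 _ (by norm_num),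
      pyGetD_take5 _ 3 _ (by norm_num), pyGetD_take5 _ 3 _ (by norm_num),
      pyGetD_take5 _ 4 _ (by norm_num), pyGetD_take5 _ 4 _ (by norm_num)]
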